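-- pv_equiv track=rewrite | github.com/KDT-02-Algorithm-Study/Algorithm-Study | week24_230706/pg84512_모음사전/pg84512_최수현.py | solution
-- ===== SOURCE A (Python) =====
-- def solution(word):
--     vowels = ['A', 'E', 'I', 'O', 'U']
--     ans = len(word)
--
--     # word 앞에서부터 한자리씩 보면서 word이전에 나왔을 모든 단어 count
--     # ex) word = 'I'
--     for i in range(len(word)):
--         n = vowels.index(word[i])   # n = 2
--         ans += n                    # I앞에 A,E 2개가 있으므로 +2
--         calc = n                    # 계산할 변수에 A,E 두가지 경우 2 저장
--         for j in range(4-i):        # 현재 자리 문자 뒤에 붙이는 것이므로 5-i-1 -> 4-i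
--             calc *= 5               # A, E에 붙일 수 있는 문자 5가지이므로 곱하기 5
--             ans += calc             # 지금 만든 문자의 경우의 수 ans에 더하기
--
--     return ans
-- ===== SOURCE B (Python) =====
-- def solution(word):
--     # subtree sizes: number of words starting with a fixed prefix of length i+1
--     weights = [781, 156, 31, 6, 1]
--     return sum("AEIOU".index(ch) * weights[i] + 1 for i, ch in enumerate(word))
-- ===== Notes on version B (the rewrite author's own statement) =====
-- stated objective: simpler
-- what changed: Replaces A's nested geometric-accumulation loops (ans length init, per-position inner loop multiplying calc by 5) with a single pass that adds index(ch)*weight[i]+1 per character using a precomputed subtree-size weight table [781,156,31,6,1].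
-- outside the precondition, e.g. on solution('AAAAAA'): A returns 6, B raises IndexError
import Mathlib
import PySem

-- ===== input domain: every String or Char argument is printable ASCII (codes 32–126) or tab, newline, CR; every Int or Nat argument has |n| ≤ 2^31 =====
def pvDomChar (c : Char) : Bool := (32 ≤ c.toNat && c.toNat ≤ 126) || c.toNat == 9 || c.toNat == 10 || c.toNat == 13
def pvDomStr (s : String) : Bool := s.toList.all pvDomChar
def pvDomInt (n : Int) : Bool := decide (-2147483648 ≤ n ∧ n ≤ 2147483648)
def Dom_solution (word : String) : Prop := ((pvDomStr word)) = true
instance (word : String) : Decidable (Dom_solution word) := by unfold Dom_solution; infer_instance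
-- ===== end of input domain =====

-- B replaces A's nested geometric accumulation by a single pass with a precomputed
-- subtree-size weight table (simpler; same cost on the problem's length-≤5 domain).

-- ===== PORT A =====
-- A iterates over the string by index; transliterated over word.toList (Python string indexing)
def solutionGo (cs : List Char) : Int :=
  let vowels : List Char := ['A', 'E', 'I', 'O', 'U']
  (PySem.List.pyRange 0 (cs.length : Int) 1).foldl
    (fun ans i =>
      -- n = vowels.index(word[i]); ValueError (index? = none) is excluded by Pre_solution
      let n : Int := match PySem.List.index? vowels (PySem.List.pyGetD cs i 'A') with
        | some m => (m : Int)
        | none => 0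
      let ans1 := ans + n
      -- for j in range(4-i): calc *= 5; ans += calc   -- state (ans, calc)
      ((PySem.List.pyRange 0 (4 - i) 1).foldl
        (fun (p : Int × Int) _ => (p.1 + p.2 * 5, p.2 * 5)) (ans1, n)).1)
    ((cs.length : Int))

def solution (word : String) : Int := solutionGo word.toList

-- ===== PORT B =====
def solutionAltGo (cs : List Char) : Int :=
  let weights : List Int := [781, 156, 31, 6, 1]
  ((PySem.List.enumerate cs).map (fun p =>
      -- "AEIOU".index(ch): ValueError excluded by Pre_; weights[i]: IndexError excluded by Pre_
      ((((PySem.List.index? ['A', 'E', 'I', 'O', 'U'] p.2).getD 0 : Nat) : Int))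
        * PySem.List.pyGetD weights p.1 0 + 1)).sum

def solution_alt (word : String) : Int := solutionAltGo word.toList

-- ===== PRECONDITION & SPEC =====
-- Pre_ excludes inputs where A raises ValueError (a non-vowel character), and all-vowel
-- words longer than 5 — outside the problem's stated length-1..5 domain — on which A
-- still returns a value but B raises IndexError on its 5-entry weight table.
def Pre_solution (word : String) : Prop :=
  word.toList.length ≤ 5 ∧
    word.toList.all (fun c => c ∈ (['A', 'E', 'I', 'O', 'U'] : List Char)) = true
instance (word : String) : Decidable (Pre_solution word) := by unfold Pre_solution; infer_instance

def pvWitness_solution : String := "EIO"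

def Spec_solution (word : String) (out : Int) : Prop := out = solution_alt word
instance (word : String) (out : Int) : Decidable (Spec_solution word out) := by unfold Spec_solution; infer_instance

-- ===== CLAIM (what is proved, stated in full; the proofs are below) =====
def Claim_equal_solution : Prop := ∀ (word : String), Dom_solution word → Pre_solution word → Spec_solution word (solution word)

-- ===== LEMMAS AND PROOFS =====

-- turn membership in the vowel list into an idxOf? fact usable by simp
lemma idx_of_mem_vowels {c : Char} (h : c ∈ (['A', 'E', 'I', 'O', 'U'] : List Char)) :
    ∃ m : Nat, List.idxOf? c ['A', 'E', 'I', 'O', 'U'] = some m := by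
  have hs := (PySem.List.index?_isSome_iff (xs := ['A', 'E', 'I', 'O', 'U']) (v := c)).mpr h
  rw [PySem.List.index?_eq_idxOf?] at hs
  exact Option.isSome_iff_exists.mp hs

lemma solution_key (l : List Char) (hl : l.length ≤ 5)
    (h : ∀ c ∈ l, c ∈ (['A', 'E', 'I', 'O', 'U'] : List Char)) :
    solutionGo l = solutionAltGo l := by
  rcases l with _ | ⟨a, _ | ⟨b, _ | ⟨c, _ | ⟨d, _ | ⟨e, _ | ⟨f, t⟩⟩⟩⟩⟩⟩
  · decide
  · obtain ⟨ma, ha⟩ := idx_of_mem_vowels (h a (by simp))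
    simp [solutionGo, solutionAltGo, PySem.List.enumerate, ha,
      show PySem.List.pyRange 0 (1:Int) 1 = [0] by decide,
      show PySem.List.pyRange 0 (4:Int) 1 = [0,1,2,3] by decide,
      PySem.List.pyGetD]
    ring
  · obtain ⟨ma, ha⟩ := idx_of_mem_vowels (h a (by simp))
    obtain ⟨mb, hb⟩ := idx_of_mem_vowels (h b (by simp))
    simp [solutionGo, solutionAltGo, PySem.List.enumerate, ha, hb,
      show PySem.List.pyRange 0 (2:Int) 1 = [0,1] by decide,
      show PySem.List.pyRange 0 (4:Int) 1 = [0,1,2,3] by decide,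
      show PySem.List.pyRange 0 (3:Int) 1 = [0,1,2] by decide,
      PySem.List.pyGetD]
    ring
  · obtain ⟨ma, ha⟩ := idx_of_mem_vowels (h a (by simp))
    obtain ⟨mb, hb⟩ := idx_of_mem_vowels (h b (by simp))
    obtain ⟨mc, hc⟩ := idx_of_mem_vowels (h c (by simp))
    simp [solutionGo, solutionAltGo, PySem.List.enumerate, ha, hb, hc,
      show PySem.List.pyRange 0 (3:Int) 1 = [0,1,2] by decide,
      show PySem.List.pyRange 0 (4:Int) 1 = [0,1,2,3] by decide,
      show PySem.List.pyRange 0 (2:Int) 1 = [0,1] by decide,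
      PySem.List.pyGetD]
    ring
  · obtain ⟨ma, ha⟩ := idx_of_mem_vowels (h a (by simp))
    obtain ⟨mb, hb⟩ := idx_of_mem_vowels (h b (by simp))
    obtain ⟨mc, hc⟩ := idx_of_mem_vowels (h c (by simp))
    obtain ⟨md, hd⟩ := idx_of_mem_vowels (h d (by simp))
    simp [solutionGo, solutionAltGo, PySem.List.enumerate, ha, hb, hc, hd,
      show PySem.List.pyRange 0 (4:Int) 1 = [0,1,2,3] by decide,
      show PySem.List.pyRange 0 (3:Int) 1 = [0,1,2] by decide,
      show PySem.List.pyRange 0 (2:Int) 1 = [0,1] by decide,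
      show PySem.List.pyRange 0 (1:Int) 1 = [0] by decide,
      PySem.List.pyGetD]
    ring
  · obtain ⟨ma, ha⟩ := idx_of_mem_vowels (h a (by simp))
    obtain ⟨mb, hb⟩ := idx_of_mem_vowels (h b (by simp))
    obtain ⟨mc, hc⟩ := idx_of_mem_vowels (h c (by simp))
    obtain ⟨md, hd⟩ := idx_of_mem_vowels (h d (by simp))
    obtain ⟨me, he⟩ := idx_of_mem_vowels (h e (by simp))
    simp [solutionGo, solutionAltGo, PySem.List.enumerate, ha, hb, hc, hd, he,
      show PySem.List.pyRange 0 (5:Int) 1 = [0,1,2,3,4] by decide,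
      show PySem.List.pyRange 0 (4:Int) 1 = [0,1,2,3] by decide,
      show PySem.List.pyRange 0 (3:Int) 1 = [0,1,2] by decide,
      show PySem.List.pyRange 0 (2:Int) 1 = [0,1] by decide,
      show PySem.List.pyRange 0 (1:Int) 1 = [0] by decide,
      show PySem.List.pyRange 0 (0:Int) 1 = [] by decide,
      PySem.List.pyGetD]
    ring
  · simp at hl; omega

-- ===== VERDICT (by name: the statement is the Claim_ definition above) =====
theorem solution_spec : Claim_equal_solution := by
  intro word _ hpre
  obtain ⟨h1, h2⟩ := hpre
  simp only [List.all_eq_true, decide_eq_true_eq] at h2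
  exact solution_key word.toList h1 h2
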